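-- pv_equiv track=rewrite | github.com/LectureHubTeam/codemath-skills | skills/cp-solver/workspace/23ckththn3_solution_v2.py | compare_cyclic_with_string
-- ===== SOURCE A (Python) =====
-- def compare_cyclic_with_string(base_str: str, k: int, target: str) -> int:
--     """
--     Compare repeat(base_str, k) with target without full construction.
--     Returns: -1 if < target, 0 if == target, 1 if > target
--
--     Key optimization: Only compare character by character, no full string build.
--     """
--     N = len(base_str)
--     total_len = N * k
--     target_len = len(target)
--
--     # Length comparison first
--     if total_len < target_len:
--         return -1
--     if total_len > target_len:
--         return 1
--
--     # Same length - compare character by character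
--     # repeat(base_str, k)[i] = base_str[i % N]
--     for i in range(total_len):
--         c_cyclic = base_str[i % N]
--         c_target = target[i]
--         if c_cyclic < c_target:
--             return -1
--         if c_cyclic > c_target:
--             return 1
--
--     return 0
-- ===== SOURCE B (Python) =====
-- def compare_cyclic_with_string(base_str: str, k: int, target: str) -> int:
--     total_len = len(base_str) * k
--     if total_len < len(target):
--         return -1
--     if total_len > len(target):
--         return 1
--     # Equal length: build the repetition (it is exactly target-sized here)
--     # and use one native lexicographic comparison.
--     full = base_str * k
--     return (full > target) - (full < target)
-- ===== Notes on version B (the rewrite author's own statement) =====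
-- stated objective: simpler
-- what changed: Removes A's per-character i%N scan entirely: after the length guards (where the repetition has exactly target's length) B materialises base_str*k and returns (full>target)-(full<target) with one native lexicographic comparison.
import Mathlib
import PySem

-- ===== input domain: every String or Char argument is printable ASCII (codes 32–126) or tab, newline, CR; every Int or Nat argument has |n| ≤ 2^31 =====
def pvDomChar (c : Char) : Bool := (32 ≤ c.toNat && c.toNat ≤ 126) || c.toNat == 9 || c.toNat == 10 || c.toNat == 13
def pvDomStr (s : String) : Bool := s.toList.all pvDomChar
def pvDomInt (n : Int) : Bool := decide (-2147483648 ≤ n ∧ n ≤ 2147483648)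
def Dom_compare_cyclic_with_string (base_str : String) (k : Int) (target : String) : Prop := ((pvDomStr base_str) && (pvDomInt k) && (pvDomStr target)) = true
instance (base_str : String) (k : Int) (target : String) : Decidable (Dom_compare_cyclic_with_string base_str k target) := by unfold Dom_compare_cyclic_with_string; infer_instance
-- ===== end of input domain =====

-- B drops A's per-character i % N scan: after the length guards it builds base_str * k
-- (exactly target-sized there) and returns one native lexicographic comparison (objective: simpler).

-- ===== PORT A =====
-- the `for i in range(total_len)` loop with early returns (default char never read:
-- inside the loop 0 ≤ i % N < N and 0 ≤ i < len(target))
def ccwsLoopA (bs tt : List Char) : List Int → Int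
  | [] => 0
  | i :: rest =>
    let c_cyclic := PySem.List.pyGetD bs (PySem.Int.mod i (bs.length : Int)) 'A'
    let c_target := PySem.List.pyGetD tt i 'A'
    if c_cyclic < c_target then -1
    else if c_target < c_cyclic then 1
    else ccwsLoopA bs tt rest

def compare_cyclic_with_string (base_str : String) (k : Int) (target : String) : Int :=
  let bs := base_str.toList
  let tt := target.toList
  let N : Int := bs.length
  let total_len := N * k
  let target_len : Int := tt.length
  if total_len < target_len then -1
  else if total_len > target_len then 1
  else ccwsLoopA bs tt (PySem.List.pyRange 0 total_len 1)

-- ===== PORT B =====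
def compare_cyclic_with_string_alt (base_str : String) (k : Int) (target : String) : Int :=
  let bs := base_str.toList
  let tt := target.toList
  let total_len : Int := (bs.length : Int) * k
  if total_len < (tt.length : Int) then -1
  else if total_len > (tt.length : Int) then 1
  else
    -- `base_str * k`: Python yields '' for k ≤ 0, matching toNat's clamp — exact here
    let full := (List.replicate k.toNat bs).flatten
    -- `(full > target) - (full < target)` with Python bool arithmetic
    (if tt < full then (1 : Int) else 0) - (if full < tt then (1 : Int) else 0)

-- ===== PRECONDITION & SPEC =====
def Spec_compare_cyclic_with_string (base_str : String) (k : Int) (target : String) (out : Int) : Prop := out = compare_cyclic_with_string_alt base_str k target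
instance (base_str : String) (k : Int) (target : String) (out : Int) : Decidable (Spec_compare_cyclic_with_string base_str k target out) := by unfold Spec_compare_cyclic_with_string; infer_instance

-- ===== CLAIM (what is proved, stated in full; the proofs are below) =====
def Claim_equal_compare_cyclic_with_string : Prop := ∀ (base_str : String) (k : Int) (target : String), Dom_compare_cyclic_with_string base_str k target → Spec_compare_cyclic_with_string base_str k target (compare_cyclic_with_string base_str k target)

-- ===== LEMMAS AND PROOFS =====

-- Nat-index view of A's loop
def loopAN (bs tt : List Char) : List Nat → Int
  | [] => 0
  | i :: rest =>
    let c1 := bs.getD (i % bs.length) 'A'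
    let c2 := tt.getD i 'A'
    if c1 < c2 then -1 else if c2 < c1 then 1 else loopAN bs tt rest

-- the three-way value of one native list comparison
def cmp3 (s t : List Char) : Int :=
  (if t < s then (1 : Int) else 0) - (if s < t then (1 : Int) else 0)

theorem ccwsLoopA_natCast (bs tt : List Char) (idxs : List Nat) :
    ccwsLoopA bs tt (idxs.map (fun (i : Nat) => (i : Int))) = loopAN bs tt idxs := by
  induction idxs with
  | nil => rfl
  | cons i rest ih =>
    simp only [List.map_cons, ccwsLoopA, loopAN]
    rw [PySem.Int.mod_natCast i bs.length]
    simp only [PySem.List.pyGetD_natCast, ih]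

-- shifting all of A's indices past one full block
theorem loopAN_shift (bs block rest : List Char) (hb : block.length = bs.length)
    (idxs : List Nat) :
    loopAN bs (block ++ rest) (idxs.map (bs.length + ·)) = loopAN bs rest idxs := by
  induction idxs with
  | nil => rfl
  | cons i t ih =>
    simp only [List.map_cons, loopAN]
    rw [Nat.add_mod_left]
    have hg : (block ++ rest).getD (bs.length + i) 'A' = rest.getD i 'A' := by
      have hle : block.length ≤ bs.length + i := by omega
      rw [List.getD, List.getD, List.getElem?_append_right hle,
        show bs.length + i - block.length = i by omega]
    rw [hg, ih]

-- A's scan of one block of indices is exactly one lexicographic comparison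
theorem loopAN_block (bs block rest : List Char) (hb : block.length = bs.length)
    (tail : List Nat) :
    ∀ n j, j + n = bs.length →
    loopAN bs (block ++ rest) (List.range' j n ++ tail)
      = if bs.drop j < block.drop j then -1
        else if block.drop j < bs.drop j then 1
        else loopAN bs (block ++ rest) tail := by
  intro n
  induction n with
  | zero =>
    intro j hj
    have hj' : j = bs.length := by omega
    subst hj'
    have e1 : List.drop bs.length bs = [] := List.drop_length
    have e2 : List.drop bs.length block = [] := by rw [← hb]; exact List.drop_length
    simp only [List.range'_zero, List.nil_append, e1, e2, lt_irrefl, if_false]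
  | succ n ih =>
    intro j hj
    have hjb : j < bs.length := by omega
    have hjk : j < block.length := by omega
    rw [List.range'_succ]
    simp only [List.cons_append, loopAN]
    rw [Nat.mod_eq_of_lt hjb]
    have g1 : bs.getD j 'A' = bs[j] := List.getD_eq_getElem bs 'A' hjb
    have g2 : (block ++ rest).getD j 'A' = block[j] := by
      rw [List.getD, List.getElem?_append_left hjk]
      simp [List.getElem?_eq_getElem hjk]
    have d1 : bs.drop j = bs[j] :: bs.drop (j + 1) := List.drop_eq_getElem_cons hjb
    have d2 : block.drop j = block[j] :: block.drop (j + 1) := List.drop_eq_getElem_cons hjk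
    rw [g1, g2, d1, d2]
    rcases lt_trichotomy bs[j] block[j] with h | h | h
    · rw [if_pos h, if_pos (by rw [List.cons_lt_cons_iff]; left; exact h)]
    · rw [if_neg (by simp [h]), if_neg (by simp [h]), ih (j + 1) (by omega)]
      simp only [List.cons_lt_cons_iff, h, lt_irrefl, false_or, true_and]
    · rw [if_neg (not_lt.mpr (le_of_lt h)), if_pos h,
        if_neg (by rw [List.cons_lt_cons_iff]
                   rintro (hc | ⟨he, -⟩)
                   · exact absurd hc (not_lt.mpr (le_of_lt h))
                   · exact absurd he.symm (ne_of_lt h)),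
        if_pos (by rw [List.cons_lt_cons_iff]; left; exact h)]

-- lexicographic order through equal-length prefixes
theorem lt_append_iff (bs : List Char) : ∀ (block : List Char), bs.length = block.length →
    ∀ s t : List Char, (bs ++ s < block ++ t) ↔ (bs < block ∨ (bs = block ∧ s < t)) := by
  induction bs with
  | nil =>
    intro block h s t
    have : block = [] := by
      cases block with
      | nil => rfl
      | cons a l => simp at h
    subst this
    simp [List.lt_iff_exists]
  | cons c cs ih =>
    intro block h s t
    cases block with
    | nil => simp at h
    | cons d ds =>
      have h' : cs.length = ds.length := by simpa using h
      simp only [List.cons_append, List.cons_lt_cons_iff, ih ds h' s t, List.cons.injEq]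
      tauto

-- one comparison of equal-length-prefixed lists splits into prefix then remainder
theorem cmp3_append (bs block : List Char) (hb : bs.length = block.length) (s t : List Char) :
    cmp3 (bs ++ s) (block ++ t)
      = if bs < block then -1 else if block < bs then 1 else cmp3 s t := by
  rcases lt_trichotomy bs block with h | h | h
  · rw [if_pos h]
    have h1 : bs ++ s < block ++ t := (lt_append_iff bs block hb s t).mpr (Or.inl h)
    have h2 : ¬ (block ++ t < bs ++ s) := by
      rw [lt_append_iff block bs hb.symm t s]
      rintro (hc | ⟨he, -⟩)
      · exact absurd h (asymm hc)
      · exact absurd he.symm (ne_of_lt h)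
    unfold cmp3
    rw [if_neg h2, if_pos h1]
    norm_num
  · subst h
    rw [if_neg (lt_irrefl _), if_neg (lt_irrefl _)]
    unfold cmp3
    simp only [lt_append_iff bs bs hb s t, lt_append_iff bs bs hb t s]
    simp
  · rw [if_neg (asymm h), if_pos h]
    have h1 : block ++ t < bs ++ s := (lt_append_iff block bs hb.symm t s).mpr (Or.inl h)
    have h2 : ¬ (bs ++ s < block ++ t) := by
      rw [lt_append_iff bs block hb s t]
      rintro (hc | ⟨he, -⟩)
      · exact absurd h (asymm hc)
      · exact absurd he (ne_of_gt h)
    unfold cmp3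
    rw [if_pos h1, if_neg h2]
    norm_num

-- the heart: on a target tiled by m blocks of length |bs|, A's scan equals one
-- native comparison of the m-fold repetition with the target
theorem loop_main (bs : List Char) (m : Nat) :
    ∀ tt : List Char, tt.length = bs.length * m →
    loopAN bs tt (List.range (bs.length * m)) = cmp3 ((List.replicate m bs).flatten) tt := by
  induction m with
  | zero =>
    intro tt h
    have : tt = [] := List.length_eq_zero_iff.mp (by simpa using h)
    subst this
    simp [loopAN, cmp3]
  | succ m ih =>
    intro tt h
    obtain ⟨block, rest, hsplit, hblock, hrest⟩ :
        ∃ block rest, tt = block ++ rest ∧ block.length = bs.length ∧ rest.length = bs.length * m := by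
      refine ⟨tt.take bs.length, tt.drop bs.length, (List.take_append_drop bs.length tt).symm, ?_, ?_⟩
      · rw [List.length_take]; have : tt.length = bs.length * m + bs.length := by rw [h]; ring
        omega
      · rw [List.length_drop, h]
        have : bs.length * (m + 1) = bs.length + bs.length * m := by ring
        omega
    subst hsplit
    rw [show bs.length * (m + 1) = bs.length + bs.length * m by ring, List.range_add,
      List.range_eq_range',
      loopAN_block bs block rest hblock _ bs.length 0 (by omega),
      show (fun x => bs.length + x) = (bs.length + ·) by rfl,
      loopAN_shift bs block rest hblock,
      show List.replicate (m + 1) bs = bs :: List.replicate m bs from rfl,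
      List.flatten_cons,
      cmp3_append bs block (by omega) _ rest]
    simp only [List.drop_zero]
    rw [ih rest hrest]
    rfl


-- B's result is 0 on a pair of empty strings-as-lists
theorem cmp3_nil : ∀ n : Nat, cmp3 ((List.replicate n ([] : List Char)).flatten) [] = 0 := by
  intro n
  have : (List.replicate n ([] : List Char)).flatten = [] := by simp
  rw [this]
  simp [cmp3]

-- the whole function, with the strings already as lists
theorem ccws_core (bs tt : List Char) (k : Int) :
    (if (bs.length : Int) * k < (tt.length : Int) then -1
     else if (bs.length : Int) * k > (tt.length : Int) then 1
     else ccwsLoopA bs tt (PySem.List.pyRange 0 ((bs.length : Int) * k) 1))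
    = (if (bs.length : Int) * k < (tt.length : Int) then -1
       else if (bs.length : Int) * k > (tt.length : Int) then 1
       else cmp3 ((List.replicate k.toNat bs).flatten) tt) := by
  by_cases h1 : (bs.length : Int) * k < (tt.length : Int)
  · rw [if_pos h1, if_pos h1]
  · rw [if_neg h1, if_neg h1]
    by_cases h2 : (bs.length : Int) * k > (tt.length : Int)
    · rw [if_pos h2, if_pos h2]
    · rw [if_neg h2, if_neg h2]
      have heq : (bs.length : Int) * k = (tt.length : Int) :=
        le_antisymm (not_lt.mp h2) (not_lt.mp h1)
      rcases bs with _ | ⟨c, cs⟩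
      · -- base empty forces target empty
        have htt : tt = [] := by
          have : (tt.length : Int) = 0 := by simpa using heq.symm
          exact List.length_eq_zero_iff.mp (by exact_mod_cast this)
        subst htt
        rw [show ((List.length ([] : List Char) : Int)) * k = ((0 : Nat) : Int) by simp,
          PySem.List.pyRange_zero_natCast, cmp3_nil]
        rfl
      · -- base nonempty; in the equal-length branch k must be a Nat
        have hNpos : 0 < (c :: cs).length := by simp
        have hk0 : 0 ≤ k := by
          by_contra hneg
          rw [not_le] at hneg
          have hlt : ((c :: cs).length : Int) * k < 0 :=
            mul_neg_of_pos_of_neg (by exact_mod_cast hNpos) hneg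
          have : (0 : Int) ≤ (tt.length : Int) := by positivity
          omega
        obtain ⟨m, rfl⟩ : ∃ m : Nat, k = (m : Int) := ⟨k.toNat, (Int.toNat_of_nonneg hk0).symm⟩
        have hlen : tt.length = (c :: cs).length * m := by exact_mod_cast heq.symm
        rw [show ((c :: cs).length : Int) * (m : Int) = (((c :: cs).length * m : Nat) : Int) by
             push_cast; ring,
          PySem.List.pyRange_zero_natCast, ccwsLoopA_natCast,
          show ((m : Int)).toNat = m from Int.toNat_natCast m,
          loop_main (c :: cs) m tt hlen]

-- ===== VERDICT (by name: the statement is the Claim_ definition above) =====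
theorem compare_cyclic_with_string_spec : Claim_equal_compare_cyclic_with_string := by
  intro base_str k target _
  show compare_cyclic_with_string base_str k target = compare_cyclic_with_string_alt base_str k target
  exact ccws_core base_str.toList target.toList k
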